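-- pv_equiv track=rewrite | github.com/Roger-Li/local-video-brief | backend/app/services/summarizer.py | _find_unescaped_quote_end
-- ===== SOURCE A (Python) =====
-- def _find_unescaped_quote_end(raw: str, start_quote_index: int) -> int | None:
--     escape = False
--     for index in range(start_quote_index + 1, len(raw)):
--         char = raw[index]
--         if escape:
--             escape = False
--             continue
--         if char == "\\":
--             escape = True
--             continue
--         if char == '"':
--             return index
--     return None
-- ===== SOURCE B (Python) =====
-- def _find_unescaped_quote_end(raw: str, start_quote_index: int) -> int | None:
--     begin = start_quote_index + 1
--     j = raw.find('"', begin)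
--     while j != -1:
--         k = j
--         while k > begin and raw[k - 1] == "\\":
--             k -= 1
--         if (j - k) % 2 == 0:
--             return j
--         j = raw.find('"', j + 1)
--     return None
-- ===== Notes on version B (the rewrite author's own statement) =====
-- stated objective: alternative
-- what changed: Replaced A's character-by-character escape-flag state machine by a staged search: str.find jumps from one '"' candidate to the next and a candidate is accepted iff the run of backslashes immediately before it has even length.
-- outside the precondition, e.g. on _find_unescaped_quote_end('a"', -2): A returns -1, B returns 1
import Mathlib
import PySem

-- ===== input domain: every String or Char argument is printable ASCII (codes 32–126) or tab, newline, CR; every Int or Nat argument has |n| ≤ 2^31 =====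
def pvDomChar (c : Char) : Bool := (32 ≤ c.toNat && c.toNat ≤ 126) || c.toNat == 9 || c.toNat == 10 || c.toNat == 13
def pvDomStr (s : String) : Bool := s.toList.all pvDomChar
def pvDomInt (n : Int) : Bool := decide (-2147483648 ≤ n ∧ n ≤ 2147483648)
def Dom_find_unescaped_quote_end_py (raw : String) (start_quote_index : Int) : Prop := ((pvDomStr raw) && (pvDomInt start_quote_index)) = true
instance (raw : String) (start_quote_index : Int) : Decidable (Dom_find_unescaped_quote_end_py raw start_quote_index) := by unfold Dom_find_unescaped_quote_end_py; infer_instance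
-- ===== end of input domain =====

-- B replaces A's character-by-character escape-flag scan by a staged search: jump from
-- one '"' candidate to the next with str.find and accept a candidate iff the run of
-- backslashes immediately before it has even length (objective: alternative algorithm).

-- ===== PORT A =====
-- for index in range(start_quote_index + 1, len(raw)): char = raw[index]; escape handling.
-- On an out-of-range negative index Python raises IndexError (pyGet? = none): excluded
-- by Pre_; the port returns none there (arbitrary, outside the claim).
def pvALoop (cs : List Char) (idxs : List Int) (escape : Bool) : Option Int :=
  match idxs with
  | [] => none
  | index :: rest =>
    match PySem.List.pyGet? cs index with
    | none => none
    | some char =>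
      if escape then pvALoop cs rest false
      else if char = '\\' then pvALoop cs rest true
      else if char = '"' then some index
      else pvALoop cs rest false

def find_unescaped_quote_end_py (raw : String) (start_quote_index : Int) : Option Int :=
  pvALoop raw.toList
    (PySem.List.pyRange (start_quote_index + 1) (PySem.Str.len raw) 1) false

-- ===== PORT B =====
-- Inner while loop of Source B: `while k > begin and raw[k-1] == "\\": k -= 1`.
def pvRunStart (cs : List Char) (begin_ : Int) (k : Int) : Int :=
  if _h : begin_ < k ∧ PySem.List.pyGet? cs (k - 1) = some '\\' then
    pvRunStart cs begin_ (k - 1)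
  else k
termination_by (k - begin_).toNat
decreasing_by omega

-- Outer while loop of Source B: j runs over the results of raw.find('"', ·); the fuel
-- (length + 1) only makes the recursion structural — j strictly increases each
-- round, so at most length + 1 rounds happen and the fuel is never exhausted.
def pvScanQuotes (cs : List Char) (begin_ : Int) : Nat → Int → Option Int
  | 0, _ => none
  | fuel + 1, j =>
    if j = -1 then none
    else
      let k := pvRunStart cs begin_ j
      if PySem.Int.mod (j - k) 2 = 0 then some j
      else pvScanQuotes cs begin_ fuel (PySem.Chars.findFrom cs ['"'] (j + 1) none)

def find_unescaped_quote_end_py_alt (raw : String) (start_quote_index : Int) : Option Int :=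
  let cs := raw.toList
  pvScanQuotes cs (start_quote_index + 1) (cs.length + 1)
    (PySem.Chars.findFrom cs ['"'] (start_quote_index + 1) none)

-- ===== PRECONDITION & SPEC =====
-- Pre_ restricts to the function's natural domain: start_quote_index is the index of an
-- already-located opening quote, so it is at least -1 (begin = start+1 ≥ 0). Below -1,
-- A either raises IndexError (start+1 < -len(raw)) or rescans the string's tail through
-- Python's negative-index wraparound, which B's forward search does not reproduce.
def Pre_find_unescaped_quote_end_py (raw : String) (start_quote_index : Int) : Prop :=
  -1 ≤ start_quote_index

instance (raw : String) (start_quote_index : Int) : Decidable (Pre_find_unescaped_quote_end_py raw start_quote_index) := by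
  unfold Pre_find_unescaped_quote_end_py; infer_instance

def pvWitness_find_unescaped_quote_end_py : String × Int := ("say \\\"hi\\\" now", 4)

def Spec_find_unescaped_quote_end_py (raw : String) (start_quote_index : Int) (out : Option Int) : Prop := out = find_unescaped_quote_end_py_alt raw start_quote_index
instance (raw : String) (start_quote_index : Int) (out : Option Int) : Decidable (Spec_find_unescaped_quote_end_py raw start_quote_index out) := by unfold Spec_find_unescaped_quote_end_py; infer_instance

-- ===== CLAIM (what is proved, stated in full; the proofs are below) =====
def Claim_equal_find_unescaped_quote_end_py : Prop := ∀ (raw : String) (start_quote_index : Int), Dom_find_unescaped_quote_end_py raw start_quote_index → Pre_find_unescaped_quote_end_py raw start_quote_index → Spec_find_unescaped_quote_end_py raw start_quote_index (find_unescaped_quote_end_py raw start_quote_index)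

-- ===== LEMMAS AND PROOFS =====

-- Proof-side intermediate program: the index-jumping scan (no escape flag, no search).
-- A is proved equal to it (pvLoop_eq), and it is proved equal to B's staged search (pvScan_eq).
def pvBLoop (cs : List Char) (i : Int) : Option Int :=
  if _h : i < (cs.length : Int) then
    match PySem.List.pyGet? cs i with
    | none => none
    | some ch =>
      if ch = '\\' then pvBLoop cs (i + 2)
      else if ch = '"' then some i
      else pvBLoop cs (i + 1)
  else none
termination_by ((cs.length : Int) - i).toNat
decreasing_by all_goals omega

theorem pvBLoop_none (cs : List Char) (i : Int) (h : (cs.length : Int) ≤ i) :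
    pvBLoop cs i = none := by
  rw [pvBLoop, dif_neg (by omega)]

-- A's escape-flag scan equals the index-jumping scan, by strong induction on the
-- remaining length, proving the escape=false and escape=true shapes together.
theorem pvLoop_eq (cs : List Char) : ∀ (n : Nat) (i : Int),
    -(cs.length : Int) ≤ i → ((cs.length : Int) - i).toNat ≤ n →
    (pvALoop cs (PySem.List.pyRange i (cs.length : Int) 1) false = pvBLoop cs i ∧
     pvALoop cs (PySem.List.pyRange i (cs.length : Int) 1) true = pvBLoop cs (i + 1)) := by
  intro n
  induction n with
  | zero =>
    intro i hlb hn
    have hge : (cs.length : Int) ≤ i := by omega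
    rw [PySem.List.pyRange_one_eq_nil hge, pvBLoop_none cs i hge,
      pvBLoop_none cs (i + 1) (by omega)]
    exact ⟨rfl, rfl⟩
  | succ n ih =>
    intro i hlb hn
    by_cases hlt : i < (cs.length : Int)
    · rw [PySem.List.pyRange_one_cons hlt]
      obtain ⟨c, hc⟩ : ∃ c, PySem.List.pyGet? cs i = some c := by
        rcases h : PySem.List.pyGet? cs i with _ | c
        · rw [PySem.List.pyGet?_eq_none_iff] at h
          exact absurd (by constructor <;> omega) h
        · exact ⟨c, rfl⟩
      have ih1 := ih (i + 1) (by omega) (by omega)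
      constructor
      · rw [pvALoop, hc]
        simp only [Bool.false_eq_true, if_false]
        by_cases hb : c = '\\'
        · rw [if_pos hb, pvBLoop]
          simp only [dif_pos hlt, hc, if_pos hb]
          have := ih1.2
          rw [show i + 1 + 1 = i + 2 from by ring] at this
          exact this
        · by_cases hq : c = '"'
          · rw [if_neg hb, if_pos hq, pvBLoop]
            simp only [dif_pos hlt, hc, if_neg hb, if_pos hq]
          · rw [if_neg hb, if_neg hq, pvBLoop]
            simp only [dif_pos hlt, hc, if_neg hb, if_neg hq]
            exact ih1.1
      · rw [pvALoop, hc]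
        simp only [if_true]
        exact ih1.1
    · have hge : (cs.length : Int) ≤ i := by omega
      rw [PySem.List.pyRange_one_eq_nil hge, pvBLoop_none cs i hge,
        pvBLoop_none cs (i + 1) (by omega)]
      exact ⟨rfl, rfl⟩

-- ---- bridges between findFrom's prefix/infix specs and pyGet? ----

theorem pvPrefix_singleton (a : Char) (l : List Char) : [a] <+: l ↔ l.head? = some a := by
  cases l with
  | nil => simp
  | cons x xs => simp [List.cons_prefix_cons, eq_comm]

theorem pvGet_nonneg (cs : List Char) (i : Int) (h : 0 ≤ i) :
    PySem.List.pyGet? cs i = cs[i.toNat]? := by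
  rw [show i = ((i.toNat : Nat) : Int) by omega, PySem.List.pyGet?_natCast]
  congr 1

-- no '"' at any index of [a, b)
def pvNoQ (cs : List Char) (a b : Int) : Prop :=
  ∀ m : Int, a ≤ m → m < b → PySem.List.pyGet? cs m ≠ some '"'

theorem pvFindFrom_past (cs sub : List Char) (k : Int) (h : (cs.length : Int) < k) :
    PySem.Chars.findFrom cs sub k none = -1 := by
  simp only [PySem.Chars.findFrom]
  split_ifs <;> first | rfl | omega

theorem pvFq_neg_one (cs : List Char) (k : Int) (hk : 0 ≤ k)
    (h : PySem.Chars.findFrom cs ['"'] k none = -1) :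
    pvNoQ cs k (cs.length : Int) := by
  intro m hm1 hm2 hq
  by_cases hkl : k ≤ (cs.length : Int)
  · rw [show k = ((k.toNat : Nat) : Int) by omega] at h
    have hni := (PySem.Chars.findFrom_natCast_eq_neg_one_iff cs ['"'] k.toNat (by omega)).mp h
    rw [List.singleton_infix_iff] at hni
    apply hni
    rw [pvGet_nonneg cs m (by omega)] at hq
    have : (cs.drop k.toNat)[m.toNat - k.toNat]? = some '"' := by
      rw [List.getElem?_drop, show k.toNat + (m.toNat - k.toNat) = m.toNat by omega]
      exact hq
    exact List.mem_of_getElem? this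
  · omega

theorem pvFq_spec (cs : List Char) (k : Int) (hk : 0 ≤ k)
    (h : PySem.Chars.findFrom cs ['"'] k none ≠ -1) :
    k ≤ PySem.Chars.findFrom cs ['"'] k none ∧
    PySem.Chars.findFrom cs ['"'] k none < (cs.length : Int) ∧
    PySem.List.pyGet? cs (PySem.Chars.findFrom cs ['"'] k none) = some '"' ∧
    pvNoQ cs k (PySem.Chars.findFrom cs ['"'] k none) := by
  by_cases hkl : k ≤ (cs.length : Int)
  · rw [show k = ((k.toNat : Nat) : Int) by omega] at h ⊢
    obtain ⟨h1, h2, h3⟩ := PySem.Chars.findFrom_natCast_spec cs ['"'] k.toNat (by omega) h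
    set F := PySem.Chars.findFrom cs ['"'] ((k.toNat : Nat) : Int) none with hF
    have hFget : cs[F.toNat]? = some '"' := by
      rw [← List.head?_drop]
      exact (pvPrefix_singleton '"' (cs.drop F.toNat)).mp h2
    have hFlt : F.toNat < cs.length := (List.getElem?_eq_some_iff.mp hFget).1
    refine ⟨h1, by omega, ?_, ?_⟩
    · rw [pvGet_nonneg cs F (by omega)]; exact hFget
    · intro m hm1 hm2 hq
      apply h3 m.toNat (by omega) (by omega)
      rw [pvPrefix_singleton, List.head?_drop]
      rw [pvGet_nonneg cs m (by omega)] at hq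
      exact hq
  · exact absurd (pvFindFrom_past cs ['"'] k (by omega)) h

-- ---- pvRunStart characterisation ----

theorem pvRunStart_spec (cs : List Char) (lo : Int) : ∀ k, lo ≤ k →
    lo ≤ pvRunStart cs lo k ∧ pvRunStart cs lo k ≤ k ∧
    (∀ t : Int, pvRunStart cs lo k ≤ t → t < k → PySem.List.pyGet? cs t = some '\\') ∧
    (pvRunStart cs lo k = lo ∨ PySem.List.pyGet? cs (pvRunStart cs lo k - 1) ≠ some '\\') := by
  have H : ∀ (n : Nat) (k : Int), lo ≤ k → (k - lo).toNat ≤ n →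
      lo ≤ pvRunStart cs lo k ∧ pvRunStart cs lo k ≤ k ∧
      (∀ t : Int, pvRunStart cs lo k ≤ t → t < k → PySem.List.pyGet? cs t = some '\\') ∧
      (pvRunStart cs lo k = lo ∨ PySem.List.pyGet? cs (pvRunStart cs lo k - 1) ≠ some '\\') := by
    intro n
    induction n with
    | zero =>
      intro k hk hn
      have hkl : k = lo := by omega
      rw [pvRunStart, dif_neg (by omega)]
      exact ⟨hk, le_rfl, fun t ht1 ht2 => by omega, Or.inl hkl⟩
    | succ n ih =>
      intro k hk hn
      by_cases hc : lo < k ∧ PySem.List.pyGet? cs (k - 1) = some '\\'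
      · rw [pvRunStart, dif_pos hc]
        obtain ⟨i1, i2, i3, i4⟩ := ih (k - 1) (by omega) (by omega)
        refine ⟨i1, by omega, ?_, i4⟩
        intro t ht1 ht2
        by_cases htk : t < k - 1
        · exact i3 t ht1 htk
        · rw [show t = k - 1 by omega]; exact hc.2
      · rw [pvRunStart, dif_neg hc]
        push Not at hc
        refine ⟨hk, le_rfl, fun t ht1 ht2 => by omega, ?_⟩
        by_cases hkl : k = lo
        · exact Or.inl hkl
        · exact Or.inr (hc (by omega))
  intro k hk
  exact H (k - lo).toNat k hk le_rfl

theorem pvRunStart_unique (cs : List Char) (lo k m : Int)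
    (h1 : lo ≤ m) (h2 : m ≤ k)
    (h3 : ∀ t : Int, m ≤ t → t < k → PySem.List.pyGet? cs t = some '\\')
    (h4 : m = lo ∨ PySem.List.pyGet? cs (m - 1) ≠ some '\\') :
    pvRunStart cs lo k = m := by
  obtain ⟨r1, r2, r3, r4⟩ := pvRunStart_spec cs lo k (by omega)
  set r := pvRunStart cs lo k with hr
  by_cases hlt : r < m
  · rcases h4 with h4 | h4
    · omega
    · exact absurd (r3 (m - 1) (by omega) (by omega)) h4
  · by_cases hgt : m < r
    · rcases r4 with r4 | r4
      · omega
      · exact absurd (h3 (r - 1) (by omega) (by omega)) r4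
    · omega

-- ---- key lemma: the jumping scan across one candidate segment ----

theorem pvBLoop_noQ (cs : List Char) : ∀ (n : Nat) (i : Int), 0 ≤ i →
    ((cs.length : Int) - i).toNat ≤ n → pvNoQ cs i (cs.length : Int) →
    pvBLoop cs i = none := by
  intro n
  induction n with
  | zero =>
    intro i hi hn _
    exact pvBLoop_none cs i (by omega)
  | succ n ih =>
    intro i hi hn hnq
    by_cases hlt : i < (cs.length : Int)
    · obtain ⟨c, hc⟩ : ∃ c, PySem.List.pyGet? cs i = some c := by
        rcases h : PySem.List.pyGet? cs i with _ | c
        · rw [PySem.List.pyGet?_eq_none_iff] at h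
          exact absurd (by constructor <;> omega) h
        · exact ⟨c, rfl⟩
      have hnq' : ∀ j : Int, i ≤ j → pvNoQ cs j (cs.length : Int) :=
        fun j hj m hm1 hm2 => hnq m (by omega) hm2
      by_cases hb : c = '\\'
      · rw [pvBLoop]
        simp only [dif_pos hlt, hc, if_pos hb]
        exact ih (i + 2) (by omega) (by omega) (hnq' (i + 2) (by omega))
      · have hq : ¬ c = '"' := fun hq => hnq i le_rfl hlt (hq ▸ hc)
        rw [pvBLoop]
        simp only [dif_pos hlt, hc, if_neg hb, if_neg hq]
        exact ih (i + 1) (by omega) (by omega) (hnq' (i + 1) (by omega))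
    · exact pvBLoop_none cs i (by omega)

theorem pvSegment (cs : List Char) : ∀ (n : Nat) (s j : Int), 0 ≤ s → s ≤ j →
    (j - s).toNat ≤ n → j < (cs.length : Int) →
    PySem.List.pyGet? cs j = some '"' → pvNoQ cs s j →
    pvBLoop cs s =
      if PySem.Int.mod (j - pvRunStart cs s j) 2 = 0 then some j
      else pvBLoop cs (j + 1) := by
  intro n
  induction n with
  | zero =>
    intro s j hs hsj hn hjl hjq _
    have hsj' : s = j := by omega
    subst hsj'
    have hrs : pvRunStart cs s s = s :=
      pvRunStart_unique cs s s s le_rfl le_rfl (fun t ht1 ht2 => by omega) (Or.inl rfl)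
    rw [hrs, sub_self, if_pos (by decide)]
    rw [pvBLoop]
    simp [dif_pos hjl, hjq]
  | succ n ih =>
    intro s j hs hsj hn hjl hjq hnq
    by_cases hsje : s = j
    · subst hsje
      have hrs : pvRunStart cs s s = s :=
        pvRunStart_unique cs s s s le_rfl le_rfl (fun t ht1 ht2 => by omega) (Or.inl rfl)
      rw [hrs, sub_self, if_pos (by decide)]
      rw [pvBLoop]
      simp [dif_pos hjl, hjq]
    · have hsj2 : s < j := by omega
      obtain ⟨c, hc⟩ : ∃ c, PySem.List.pyGet? cs s = some c := by
        rcases h : PySem.List.pyGet? cs s with _ | c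
        · rw [PySem.List.pyGet?_eq_none_iff] at h
          exact absurd (by constructor <;> omega) h
        · exact ⟨c, rfl⟩
      have hcq : ¬ c = '"' := fun hq => hnq s le_rfl hsj2 (hq ▸ hc)
      obtain ⟨r1, r2, r3, r4⟩ := pvRunStart_spec cs s j (by omega)
      set r := pvRunStart cs s j with hr
      have hslt : s < (cs.length : Int) := by omega
      by_cases hb : c = '\\'
      · rw [pvBLoop]
        simp only [dif_pos hslt, hc, if_pos hb]
        by_cases hj1 : j = s + 1
        · -- run is exactly the single backslash at s
          have hrv : r = s := by
            rw [hr]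
            exact pvRunStart_unique cs s j s le_rfl (by omega)
              (fun t ht1 ht2 => by rw [show t = s by omega]; exact hb ▸ hc) (Or.inl rfl)
          rw [hrv, hj1, if_neg (by rw [PySem.Int.mod_eq_emod_of_pos (by norm_num)]; omega)]
          rw [show s + 1 + 1 = s + 2 by ring]
        · have hstep := ih (s + 2) j (by omega) (by omega) (by omega) hjl hjq
            (fun m hm1 hm2 => hnq m (by omega) hm2)
          rw [hstep]
          by_cases hrs : r = s
          · -- run reaches s: the (s+2)-bounded run start is s + 2, parities agree
            have hr2v : pvRunStart cs (s + 2) j = s + 2 :=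
              pvRunStart_unique cs (s + 2) j (s + 2) le_rfl (by omega)
                (fun t ht1 ht2 => r3 t (by omega) ht2) (Or.inl rfl)
            rw [hr2v, hrs]
            rw [show (if PySem.Int.mod (j - s) 2 = 0 then some j else pvBLoop cs (j + 1)) =
                  (if PySem.Int.mod (j - (s + 2)) 2 = 0 then some j else pvBLoop cs (j + 1)) from by
              rw [PySem.Int.mod_eq_emod_of_pos (by norm_num),
                PySem.Int.mod_eq_emod_of_pos (by norm_num)]
              by_cases hpar : (j - s) % 2 = 0
              · rw [if_pos hpar, if_pos (by omega)]
              · rw [if_neg hpar, if_neg (by omega)]]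
          · -- run stops above s: both bounded run starts coincide
            have hr4 : PySem.List.pyGet? cs (r - 1) ≠ some '\\' := r4.resolve_left hrs
            have hrge : s + 2 ≤ r := by
              by_cases h2 : r = s + 1
              · refine absurd ?_ hr4
                rw [h2, show s + 1 - 1 = s by ring, hc, hb]
              · omega
            have hr2v : pvRunStart cs (s + 2) j = r :=
              pvRunStart_unique cs (s + 2) j r hrge r2 r3 (Or.inr hr4)
            rw [hr2v]
      · rw [pvBLoop]
        simp only [dif_pos hslt, hc, if_neg hb, if_neg hcq]
        have hstep := ih (s + 1) j (by omega) (by omega) (by omega) hjl hjq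
          (fun m hm1 hm2 => hnq m (by omega) hm2)
        rw [hstep]
        have hrges : s + 1 ≤ r := by
          by_cases h1 : r = s
          · have hbs := r3 s (by omega) hsj2
            rw [hc] at hbs
            exact absurd (Option.some.inj hbs) hb
          · omega
        have hr1v : pvRunStart cs (s + 1) j = r := by
          apply pvRunStart_unique cs (s + 1) j r hrges r2 r3
          rcases r4 with h4 | h4
          · omega
          · exact Or.inr h4
        rw [hr1v]

-- ---- master lemma: the jumping scan equals B's staged search ----

theorem pvScan_eq (cs : List Char) (begin_ : Int) (hb : 0 ≤ begin_) :
    ∀ (fuel : Nat) (s : Int), begin_ ≤ s →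
    ((cs.length : Int) - s).toNat < fuel →
    (s = begin_ ∨ PySem.List.pyGet? cs (s - 1) = some '"') →
    pvBLoop cs s = pvScanQuotes cs begin_ fuel (PySem.Chars.findFrom cs ['"'] s none) := by
  intro fuel
  induction fuel with
  | zero => intro s _ hf _; omega
  | succ fuel ih =>
    intro s hs hf hinv
    have hs0 : 0 ≤ s := by omega
    by_cases hF : PySem.Chars.findFrom cs ['"'] s none = -1
    · rw [hF]
      rw [pvBLoop_noQ cs ((cs.length : Int) - s).toNat s hs0 le_rfl (pvFq_neg_one cs s hs0 hF)]
      rfl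
    · obtain ⟨f1, f2, f3, f4⟩ := pvFq_spec cs s hs0 hF
      set F := PySem.Chars.findFrom cs ['"'] s none with hFdef
      obtain ⟨r1, r2, r3, r4⟩ := pvRunStart_spec cs s F (by omega)
      set r := pvRunStart cs s F with hr
      -- B's run start (bounded below by begin_) coincides with the s-bounded one:
      -- the character at s - 1 (when s > begin_) is a '"', which stops the run.
      have hrB : pvRunStart cs begin_ F = r := by
        apply pvRunStart_unique cs begin_ F r (by omega) r2 r3
        rcases r4 with h4 | h4
        · rcases hinv with hi | hi
          · exact Or.inl (h4.trans hi)
          · refine Or.inr ?_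
            rw [h4, hi]
            simp
        · exact Or.inr h4
      have hseg := pvSegment cs (F - s).toNat s F hs0 f1 le_rfl f2 f3 f4
      rw [pvScanQuotes]
      rw [if_neg (by omega), hrB]
      show pvBLoop cs s = if PySem.Int.mod (F - r) 2 = 0 then some F
        else pvScanQuotes cs begin_ fuel (PySem.Chars.findFrom cs ['"'] (F + 1) none)
      rw [← hr] at hseg
      by_cases hpar : PySem.Int.mod (F - r) 2 = 0
      · rw [hseg, if_pos hpar, if_pos hpar]
      · rw [hseg, if_neg hpar, if_neg hpar]
        exact ih (F + 1) (by omega) (by omega)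
          (Or.inr (by rw [show F + 1 - 1 = F by ring]; exact f3))

-- ===== VERDICT (by name: the statement is the Claim_ definition above) =====
theorem find_unescaped_quote_end_py_spec : Claim_equal_find_unescaped_quote_end_py := by
  intro raw start_quote_index _hdom hpre
  unfold Pre_find_unescaped_quote_end_py at hpre
  unfold Spec_find_unescaped_quote_end_py
  unfold find_unescaped_quote_end_py find_unescaped_quote_end_py_alt
  rw [PySem.Str.len_eq]
  have hb : 0 ≤ start_quote_index + 1 := by omega
  have hA := (pvLoop_eq raw.toList (((raw.toList.length : Int) - (start_quote_index + 1)).toNat)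
    (start_quote_index + 1) (by omega) (le_refl _)).1
  rw [hA]
  exact pvScan_eq raw.toList (start_quote_index + 1) hb (raw.toList.length + 1)
    (start_quote_index + 1) (le_refl _) (by omega) (Or.inl rfl)
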